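-- pv_equiv track=rewrite | github.com/canturk3/e-book-word-frequency-analysis | e_book_analysis.py | CommonDistinctWords
-- ===== SOURCE A (Python) =====
-- def CommonDistinctWords(dict1,dict2):
--     common_dict = {}
--     distinct_dict1 = {}
--     distinct_dict2 = {}
--     #If a word from first book is found in second book, adds it to the common words; if it is not found,
--     #adds it to the distinct words of the first book
--     for word1 in dict1:
--         equals = False
--         for word2 in dict2:
--              if(word1 == word2):
--                  common_dict[word1] = dict1[word1] + dict2[word2]
--                  equals = True
--                  break
--         if(equals == False):
--              distinct_dict1[word1] = dict1[word1]
--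
--     #If a word from the second book isn't found in the first book,
--     #adds it to the distinct words of the second book
--     for word2 in dict2:
--         equals = False
--         for word1 in dict1:
--              if(word1 == word2):
--                  equals = True
--                  break
--         if(equals == False):
--              distinct_dict2[word2] = dict2[word2]
--
--     return common_dict, distinct_dict1, distinct_dict2
-- ===== SOURCE B (Python) =====
-- def CommonDistinctWords(dict1, dict2):
--     # One accumulation pass: merged maps each word to (running sum, tag mask),
--     # tag 1 = seen in dict1, tag 2 = seen in dict2, so mask 3 = seen in both.
--     merged = {}
--     for tag, d in ((1, dict1), (2, dict2)):
--         for w, c in d.items():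
--             if w in merged:
--                 total, mask = merged[w]
--                 merged[w] = (total + c, mask + tag)
--             else:
--                 merged[w] = (c, tag)
--     # One classification pass over the merged accumulator.
--     common_dict = {}
--     distinct_dict1 = {}
--     distinct_dict2 = {}
--     for w, (total, mask) in merged.items():
--         if mask == 3:
--             common_dict[w] = total
--         elif mask == 1:
--             distinct_dict1[w] = total
--         else:
--             distinct_dict2[w] = total
--     return common_dict, distinct_dict1, distinct_dict2
-- ===== Notes on version B (the rewrite author's own statement) =====
-- stated objective: faster
-- what changed: Instead of partitioning by per-word membership scans of the opposite dict, B folds both dicts into ONE merged accumulator tagging each word with a sum and a source bitmask, then emits the three dicts in a single classification pass over the accumulator.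
import Mathlib
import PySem

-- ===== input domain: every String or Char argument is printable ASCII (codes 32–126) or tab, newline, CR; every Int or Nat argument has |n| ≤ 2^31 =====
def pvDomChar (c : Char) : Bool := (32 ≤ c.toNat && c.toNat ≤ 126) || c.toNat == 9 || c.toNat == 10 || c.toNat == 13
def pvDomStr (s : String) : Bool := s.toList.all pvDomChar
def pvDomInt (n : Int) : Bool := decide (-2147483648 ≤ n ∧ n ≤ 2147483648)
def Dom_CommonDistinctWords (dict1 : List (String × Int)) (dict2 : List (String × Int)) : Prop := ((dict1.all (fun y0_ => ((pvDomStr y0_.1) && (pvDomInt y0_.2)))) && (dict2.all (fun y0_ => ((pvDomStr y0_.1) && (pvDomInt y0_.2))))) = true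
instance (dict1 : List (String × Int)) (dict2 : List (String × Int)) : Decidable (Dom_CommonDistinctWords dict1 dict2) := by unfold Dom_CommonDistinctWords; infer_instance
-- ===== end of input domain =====

-- B replaces A's per-word membership scans of the opposite dict by ONE merged accumulation
-- pass (word -> (sum, source bitmask)) followed by one classification pass (objective: faster).
-- ===== PORT A =====
-- for word1 in dict1: inner scan over dict2 with break = List.find?; dict inserts are at
-- fresh keys (Pre_: unique keys), so each insert appends.
def CommonDistinctWords (dict1 : List (String × Int)) (dict2 : List (String × Int)) : (List (String × Int)) × (List (String × Int)) × (List (String × Int)) :=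
  let p := dict1.foldl (fun (acc : List (String × Int) × List (String × Int)) w1 =>
    match dict2.find? (fun w2 => w1.1 == w2.1) with
    | some w2 => (acc.1 ++ [(w1.1, (PySem.Dict.mk dict1).getD w1.1 0 + (PySem.Dict.mk dict2).getD w2.1 0)], acc.2)
    | none => (acc.1, acc.2 ++ [(w1.1, (PySem.Dict.mk dict1).getD w1.1 0)])) ([], [])
  let d2 := dict2.foldl (fun (acc : List (String × Int)) w2 =>
    match dict1.find? (fun w1 => w1.1 == w2.1) with
    | some _ => acc
    | none => acc ++ [(w2.1, (PySem.Dict.mk dict2).getD w2.1 0)]) []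
  (p.1, p.2, d2)

-- ===== PORT B =====
-- merged[w] update of B's inner loop (w in merged → add count and tag; else fresh entry)
def pvMergeStep (tag : Int) (m : PySem.Dict String (Int × Int)) (wc : String × Int) : PySem.Dict String (Int × Int) :=
  match m.get? wc.1 with
  | some tm => m.insert wc.1 (tm.1 + wc.2, tm.2 + tag)
  | none => m.insert wc.1 (wc.2, tag)

-- the classification pass: mask 3 → common, mask 1 → distinct1, else → distinct2
def pvClassStep (acc : (List (String × Int)) × (List (String × Int)) × (List (String × Int))) (e : String × (Int × Int)) : (List (String × Int)) × (List (String × Int)) × (List (String × Int)) :=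
  if e.2.2 == 3 then (acc.1 ++ [(e.1, e.2.1)], acc.2.1, acc.2.2)
  else if e.2.2 == 1 then (acc.1, acc.2.1 ++ [(e.1, e.2.1)], acc.2.2)
  else (acc.1, acc.2.1, acc.2.2 ++ [(e.1, e.2.1)])

def CommonDistinctWords_alt (dict1 : List (String × Int)) (dict2 : List (String × Int)) : (List (String × Int)) × (List (String × Int)) × (List (String × Int)) :=
  let merged := [((1 : Int), dict1), ((2 : Int), dict2)].foldl
    (fun m td => td.2.foldl (pvMergeStep td.1) m) PySem.Dict.empty
  merged.items.foldl pvClassStep ([], [], [])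

-- ===== PRECONDITION & SPEC =====
-- The Python arguments are dicts, whose keys are necessarily distinct; association lists
-- with duplicate keys represent no Python input, so Pre_ requires unique keys.
def Pre_CommonDistinctWords (dict1 : List (String × Int)) (dict2 : List (String × Int)) : Prop :=
  (dict1.map Prod.fst).Nodup ∧ (dict2.map Prod.fst).Nodup
instance (dict1 : List (String × Int)) (dict2 : List (String × Int)) : Decidable (Pre_CommonDistinctWords dict1 dict2) := by unfold Pre_CommonDistinctWords; infer_instance
def pvWitness_CommonDistinctWords : (List (String × Int)) × (List (String × Int)) := ([("a", 1), ("b", 2)], [("b", 3), ("c", 4)])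
def Spec_CommonDistinctWords (dict1 : List (String × Int)) (dict2 : List (String × Int)) (out : (List (String × Int)) × (List (String × Int)) × (List (String × Int))) : Prop := out = CommonDistinctWords_alt dict1 dict2
instance (dict1 : List (String × Int)) (dict2 : List (String × Int)) (out : (List (String × Int)) × (List (String × Int)) × (List (String × Int))) : Decidable (Spec_CommonDistinctWords dict1 dict2 out) := by unfold Spec_CommonDistinctWords; infer_instance

-- ===== CLAIM (what is proved, stated in full; the proofs are below) =====
def Claim_equal_CommonDistinctWords : Prop := ∀ (dict1 : List (String × Int)) (dict2 : List (String × Int)), Dom_CommonDistinctWords dict1 dict2 → Pre_CommonDistinctWords dict1 dict2 → Spec_CommonDistinctWords dict1 dict2 (CommonDistinctWords dict1 dict2)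

-- ===== LEMMAS AND PROOFS =====

-- canonical value both sides are reduced to
def pvCanon (dict1 dict2 : List (String × Int)) : (List (String × Int)) × (List (String × Int)) × (List (String × Int)) :=
  ( dict1.filterMap (fun wc => if (dict2.map Prod.fst).contains wc.1 then some (wc.1, wc.2 + (PySem.Dict.mk dict2).getD wc.1 0) else none),
    dict1.filter (fun wc => ! (dict2.map Prod.fst).contains wc.1),
    dict2.filter (fun wc => ! (dict1.map Prod.fst).contains wc.1) )

-- the merged dict after B's accumulation over dict1 then a prefix q of dict2
def pvMerged (dict1 q : List (String × Int)) : PySem.Dict String (Int × Int) :=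
  PySem.Dict.mk (
    dict1.map (fun wc => if (q.map Prod.fst).contains wc.1 then (wc.1, (wc.2 + (PySem.Dict.mk q).getD wc.1 0, 3)) else (wc.1, (wc.2, 1)))
    ++ (q.filter (fun wc => ! (dict1.map Prod.fst).contains wc.1)).map (fun wc => (wc.1, (wc.2, 2))))

theorem pvA_pass1 (dict1 dict2 : List (String × Int))
    (h1 : (dict1.map Prod.fst).Nodup) :
    ∀ (l : List (String × Int)) (c d : List (String × Int)), (∀ x ∈ l, x ∈ dict1) →
    l.foldl (fun (acc : List (String × Int) × List (String × Int)) w1 =>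
      match dict2.find? (fun w2 => w1.1 == w2.1) with
      | some w2 => (acc.1 ++ [(w1.1, (PySem.Dict.mk dict1).getD w1.1 0 + (PySem.Dict.mk dict2).getD w2.1 0)], acc.2)
      | none => (acc.1, acc.2 ++ [(w1.1, (PySem.Dict.mk dict1).getD w1.1 0)])) (c, d)
    = (c ++ l.filterMap (fun wc => if (dict2.map Prod.fst).contains wc.1 then some (wc.1, wc.2 + (PySem.Dict.mk dict2).getD wc.1 0) else none),
       d ++ l.filter (fun wc => ! (dict2.map Prod.fst).contains wc.1)) := by
  intro l
  induction l with
  | nil => intro c d _; simp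
  | cons x l ih =>
    intro c d hmem
    have hx : x ∈ dict1 := hmem x (List.mem_cons_self ..)
    have hv1 : (PySem.Dict.mk dict1).getD x.1 0 = x.2 := by
      apply PySem.Dict.getD_of_mem_items (d := PySem.Dict.mk dict1) <;> simpa [PySem.Dict.items, PySem.Dict.keys]
    have hcont : (dict2.map Prod.fst).contains x.1
        = (dict2.find? (fun w2 => x.1 == w2.1)).isSome := by
      rw [Bool.eq_iff_iff, List.contains_iff_mem, List.find?_isSome]
      simp only [List.mem_map, beq_iff_eq]
      exact ⟨fun ⟨a, ha, he⟩ => ⟨a, ha, he.symm⟩, fun ⟨a, ha, he⟩ => ⟨a, ha, he.symm⟩⟩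
    simp only [List.foldl_cons, List.filterMap_cons, List.filter_cons]
    rcases hfind : dict2.find? (fun w2 => x.1 == w2.1) with _ | w2
    · have hc : (dict2.map Prod.fst).contains x.1 = false := by
        rw [hcont, hfind]; rfl
      simp only [hfind, hc]
      rw [ih (c) (d ++ [(x.1, (PySem.Dict.mk dict1).getD x.1 0)]) (fun y hy => hmem y (List.mem_cons_of_mem _ hy))]
      simp [hv1]
    · have hc : (dict2.map Prod.fst).contains x.1 = true := by
        rw [hcont, hfind]; rfl
      have hkey : w2.1 = x.1 := by
        exact (beq_iff_eq.mp (List.find?_some (p := fun q : String × Int => x.1 == q.1) hfind)).symm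
      simp only [hfind, hc]
      rw [ih (c ++ [(x.1, (PySem.Dict.mk dict1).getD x.1 0 + (PySem.Dict.mk dict2).getD w2.1 0)]) d (fun y hy => hmem y (List.mem_cons_of_mem _ hy))]
      rw [hkey, hv1]
      simp

theorem pvA_pass2 (dict1 dict2 : List (String × Int))
    (h2 : (dict2.map Prod.fst).Nodup) :
    ∀ (l : List (String × Int)) (c : List (String × Int)), (∀ x ∈ l, x ∈ dict2) →
    l.foldl (fun (acc : List (String × Int)) w2 =>
      match dict1.find? (fun w1 => w1.1 == w2.1) with
      | some _ => acc
      | none => acc ++ [(w2.1, (PySem.Dict.mk dict2).getD w2.1 0)]) c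
    = c ++ l.filter (fun wc => ! (dict1.map Prod.fst).contains wc.1) := by
  intro l
  induction l with
  | nil => intro c _; simp
  | cons x l ih =>
    intro c hmem
    have hx : x ∈ dict2 := hmem x (List.mem_cons_self ..)
    have hv : (PySem.Dict.mk dict2).getD x.1 0 = x.2 := by
      apply PySem.Dict.getD_of_mem_items (d := PySem.Dict.mk dict2) <;> simpa [PySem.Dict.items, PySem.Dict.keys]
    have hcont : (dict1.map Prod.fst).contains x.1
        = (dict1.find? (fun w1 => w1.1 == x.1)).isSome := by
      rw [Bool.eq_iff_iff, List.contains_iff_mem, List.find?_isSome]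
      simp [List.mem_map]
    simp only [List.foldl_cons, List.filter_cons]
    rcases hfind : dict1.find? (fun w1 => w1.1 == x.1) with _ | w1
    · have hc : (dict1.map Prod.fst).contains x.1 = false := by
        rw [hcont, hfind]; rfl
      simp only [hfind, hc]
      rw [ih (c ++ [(x.1, (PySem.Dict.mk dict2).getD x.1 0)]) (fun y hy => hmem y (List.mem_cons_of_mem _ hy))]
      simp [hv]
    · have hc : (dict1.map Prod.fst).contains x.1 = true := by
        rw [hcont, hfind]; rfl
      simp only [hfind, hc]
      rw [ih c (fun y hy => hmem y (List.mem_cons_of_mem _ hy))]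
      simp


-- two members of a nodup-key association list with the same key are equal
theorem pvKeyUnique {l : List (String × Int)} (h : (l.map Prod.fst).Nodup)
    {a b : String × Int} (ha : a ∈ l) (hb : b ∈ l) (he : a.1 = b.1) : a = b := by
  induction l with
  | nil => cases ha
  | cons x l ih =>
    simp only [List.map_cons, List.nodup_cons] at h
    rcases List.mem_cons.mp ha with rfl | ha' <;> rcases List.mem_cons.mp hb with rfl | hb'
    · rfl
    · exact absurd (he ▸ List.mem_map_of_mem hb') h.1
    · exact absurd (he ▸ List.mem_map_of_mem ha') h.1
    · exact ih h.2 ha' hb'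

-- lookup in a concatenated literal dict is the first lookup that hits
theorem pvGet?_mk_append {ν : Type} (p r : List (String × ν)) (k : String) :
    (PySem.Dict.mk (p ++ r)).get? k = ((PySem.Dict.mk p).get? k).or ((PySem.Dict.mk r).get? k) := by
  induction p with
  | nil => simp [PySem.Dict.get?]
  | cons x p ih =>
    obtain ⟨k0, v0⟩ := x
    simp only [List.cons_append, PySem.Dict.get?_mk_cons]
    split <;> simp [ih]

theorem pvFilterMap_filter (l : List (String × Int)) (c : (String × Int) → Bool) :
    l.filterMap (fun wc => if c wc then none else some wc) = l.filter (fun wc => ! c wc) := by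
  induction l with
  | nil => rfl
  | cons x l ih => by_cases h : c x <;> simp [h, ih]

theorem pvMerged_keys (dict1 q : List (String × Int)) :
    (pvMerged dict1 q).keys
    = dict1.map Prod.fst ++ (q.filter (fun wc => ! (dict1.map Prod.fst).contains wc.1)).map Prod.fst := by
  simp only [pvMerged, PySem.Dict.keys, List.map_append, List.map_map]
  congr 1
  refine List.map_congr_left (fun wc _ => ?_)
  dsimp only [Function.comp_apply]
  split <;> rfl

theorem pvMerged_nodup (dict1 q : List (String × Int))
    (h1 : (dict1.map Prod.fst).Nodup) (hq : (q.map Prod.fst).Nodup) :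
    (pvMerged dict1 q).keys.Nodup := by
  rw [pvMerged_keys]
  refine List.Nodup.append h1 (hq.sublist (List.Sublist.map Prod.fst List.filter_sublist)) ?_
  intro a ha hb
  obtain ⟨wc, hwc, rfl⟩ := List.mem_map.mp hb
  have := (List.mem_filter.mp hwc).2
  simp only [Bool.not_eq_true', List.contains_eq_mem, decide_eq_false_iff_not] at this
  exact this ha

theorem pvMerged_get?_of_mem (dict1 q : List (String × Int))
    (h1 : (dict1.map Prod.fst).Nodup) (hq : (q.map Prod.fst).Nodup)
    (wc : String × Int) (hwc : wc ∈ dict1) (hnp : wc.1 ∉ q.map Prod.fst) :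
    (pvMerged dict1 q).get? wc.1 = some (wc.2, 1) := by
  refine PySem.Dict.get?_of_mem_items _ ?_ (pvMerged_nodup dict1 q h1 hq)
  show _ ∈ _ ++ _
  refine List.mem_append_left _ ?_
  have hc : ((q.map Prod.fst).contains wc.1) = false := by
    rw [List.contains_eq_mem]; exact decide_eq_false hnp
  have : (fun wc : String × Int => if (q.map Prod.fst).contains wc.1 then (wc.1, (wc.2 + (PySem.Dict.mk q).getD wc.1 0, (3:Int))) else (wc.1, (wc.2, 1))) wc = (wc.1, (wc.2, 1)) := by
    simp only [hc]; rfl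
  exact this ▸ List.mem_map_of_mem hwc

theorem pvMerged_get?_none (dict1 q : List (String × Int)) (k : String)
    (hk1 : k ∉ dict1.map Prod.fst) (hkq : k ∉ q.map Prod.fst) :
    (pvMerged dict1 q).get? k = none := by
  rw [PySem.Dict.get?_eq_none_iff_not_mem_keys, pvMerged_keys]
  intro h
  rcases List.mem_append.mp h with h | h
  · exact hk1 h
  · obtain ⟨wc, hwc, rfl⟩ := List.mem_map.mp h
    exact hkq (List.mem_map_of_mem (List.mem_of_mem_filter hwc))

theorem pvGetD_mk_snoc_self (p : List (String × Int)) (x : String × Int)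
    (hxp : x.1 ∉ p.map Prod.fst) : (PySem.Dict.mk (p ++ [x])).getD x.1 0 = x.2 := by
  rw [PySem.Dict.getD_eq_get?_getD, pvGet?_mk_append]
  have hp : (PySem.Dict.mk p).get? x.1 = none := by
    rw [PySem.Dict.get?_eq_none_iff_not_mem_keys]; exact hxp
  rw [hp]
  simp [PySem.Dict.get?]

theorem pvGetD_mk_snoc_ne (p : List (String × Int)) (x : String × Int) (k : String)
    (hk : k ≠ x.1) : (PySem.Dict.mk (p ++ [x])).getD k 0 = (PySem.Dict.mk p).getD k 0 := by
  rw [PySem.Dict.getD_eq_get?_getD, PySem.Dict.getD_eq_get?_getD, pvGet?_mk_append]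
  have hnone : (PySem.Dict.mk [x]).get? k = none := by
    obtain ⟨k0, v0⟩ := x
    rw [PySem.Dict.get?_mk_cons]
    rw [beq_eq_false_iff_ne.mpr (Ne.symm hk)]
    simp [PySem.Dict.get?]
  rw [hnone]
  cases (PySem.Dict.mk p).get? k <;> rfl

theorem pvMerged_snoc_common (dict1 p : List (String × Int))
    (h1 : (dict1.map Prod.fst).Nodup)
    (x : String × Int) (hxp : x.1 ∉ p.map Prod.fst)
    (wc0 : String × Int) (h0 : wc0 ∈ dict1) (h0k : wc0.1 = x.1) :
    (pvMerged dict1 p).insert x.1 (wc0.2 + x.2, 1 + 2) = pvMerged dict1 (p ++ [x]) := by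
  have hx1 : x.1 ∈ dict1.map Prod.fst := h0k ▸ List.mem_map_of_mem h0
  have hcont : (pvMerged dict1 p).contains x.1 = true := by
    rw [PySem.Dict.contains_iff_mem_keys, pvMerged_keys]
    exact List.mem_append_left _ hx1
  apply PySem.Dict.ext
  rw [PySem.Dict.items_insert_of_contains _ _ hcont]
  show (List.map _ _ ++ List.map _ _).map _ = _ ++ _
  rw [List.map_append]
  congr 1
  · -- first segment
    rw [List.map_map]
    refine List.map_congr_left (fun wc hwc => ?_)
    by_cases hk : wc.1 = x.1
    · have hwc0 : wc = wc0 := pvKeyUnique h1 hwc h0 (hk.trans h0k.symm)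
      subst hwc0
      have hcp : ((p.map Prod.fst).contains wc.1) = false := by
        rw [List.contains_eq_mem]; exact decide_eq_false (hk ▸ hxp)
      have hcpx : (((p ++ [x]).map Prod.fst).contains wc.1) = true := by
        simp [List.contains_eq_mem, hk]
      simp only [Function.comp_apply, hcp, hcpx, if_true]
      rw [hk, pvGetD_mk_snoc_self p x hxp]
      simp
    · have hcpx : ((p ++ [x]).map Prod.fst).contains wc.1 = (p.map Prod.fst).contains wc.1 := by
        simp [List.contains_eq_mem, hk]
      simp only [Function.comp_apply, hcpx]
      simp [hk, pvGetD_mk_snoc_ne p x wc.1 hk, apply_ite Prod.fst]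
  · -- second segment
    rw [List.filter_append]
    have hxf : [x].filter (fun wc => ! (dict1.map Prod.fst).contains wc.1) = [] := by
      have hc : ((dict1.map Prod.fst).contains x.1) = true := by
        rw [List.contains_eq_mem]; exact decide_eq_true hx1
      simp only [List.filter_cons, List.filter_nil, hc]; rfl
    rw [hxf, List.append_nil]
    rw [List.map_map]
    refine List.map_congr_left (fun wc hwc => ?_)
    have hk : wc.1 ≠ x.1 := by
      intro he
      exact hxp (he ▸ List.mem_map_of_mem (List.mem_of_mem_filter hwc))
    simp [Function.comp, hk]

theorem pvMerged_snoc_new (dict1 p : List (String × Int))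
    (x : String × Int) (hx1 : x.1 ∉ dict1.map Prod.fst) (hxp : x.1 ∉ p.map Prod.fst) :
    (pvMerged dict1 p).insert x.1 (x.2, 2) = pvMerged dict1 (p ++ [x]) := by
  have hcont : (pvMerged dict1 p).contains x.1 = false := by
    rw [Bool.eq_false_iff]
    intro h
    rw [PySem.Dict.contains_iff_mem_keys, pvMerged_keys] at h
    rcases List.mem_append.mp h with h | h
    · exact hx1 h
    · obtain ⟨wc, hwc, hfst⟩ := List.mem_map.mp h
      exact hxp (hfst ▸ List.mem_map_of_mem (List.mem_of_mem_filter hwc))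
  apply PySem.Dict.ext
  rw [PySem.Dict.items_insert_of_not_contains _ _ hcont]
  show (List.map _ _ ++ List.map _ _) ++ _ = _ ++ _
  rw [List.append_assoc]
  congr 1
  · -- first segment unchanged
    refine List.map_congr_left (fun wc hwc => ?_)
    have hk : wc.1 ≠ x.1 := fun he => hx1 (he ▸ List.mem_map_of_mem hwc)
    have hcpx : ((p ++ [x]).map Prod.fst).contains wc.1 = (p.map Prod.fst).contains wc.1 := by
      simp [List.contains_eq_mem, hk]
    rw [hcpx]
    simp [pvGetD_mk_snoc_ne p x wc.1 hk]
  · -- second segment grows by x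
    rw [List.filter_append]
    have hxf : [x].filter (fun wc => ! (dict1.map Prod.fst).contains wc.1) = [x] := by
      have hc : ((dict1.map Prod.fst).contains x.1) = false := by
        rw [List.contains_eq_mem]; exact decide_eq_false hx1
      simp only [List.filter_cons, List.filter_nil, hc]; rfl
    rw [hxf, List.map_append]
    rfl

theorem pvMerge_fresh (tag : Int) : ∀ (l : List (String × Int)) (m : PySem.Dict String (Int × Int)),
    (l.map Prod.fst).Nodup → (∀ x ∈ l, m.contains x.1 = false) →
    (l.foldl (pvMergeStep tag) m).items = m.items ++ l.map (fun wc => (wc.1, (wc.2, tag))) := by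
  intro l
  induction l with
  | nil => intro m _ _; simp
  | cons x l ih =>
    intro m hnd hf
    have hc : m.contains x.1 = false := hf x (List.mem_cons_self ..)
    have hg : m.get? x.1 = none := (PySem.Dict.get?_eq_none_iff_contains m x.1).mpr hc
    simp only [List.map_cons, List.nodup_cons] at hnd
    simp only [List.foldl_cons, pvMergeStep, hg]
    rw [ih (m.insert x.1 (x.2, tag)) hnd.2 ?_]
    · rw [PySem.Dict.items_insert_of_not_contains _ _ hc]
      simp
    · intro y hy
      rw [PySem.Dict.contains_insert]
      have hyx : (y.1 == x.1) = false := by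
        simp only [beq_eq_false_iff_ne, ne_eq]
        exact fun he => hnd.1 (he ▸ List.mem_map_of_mem hy)
      rw [hyx, Bool.false_or]
      exact hf y (List.mem_cons_of_mem _ hy)

theorem pvMerge2 (dict1 : List (String × Int)) (h1 : (dict1.map Prod.fst).Nodup) :
    ∀ (l p : List (String × Int)), ((p ++ l).map Prod.fst).Nodup →
    l.foldl (pvMergeStep 2) (pvMerged dict1 p) = pvMerged dict1 (p ++ l) := by
  intro l
  induction l with
  | nil => intro p _; simp
  | cons x l ih =>
    intro p hnd
    have hnd' : (((p ++ [x]) ++ l).map Prod.fst).Nodup := by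
      simpa [List.append_assoc] using hnd
    have hp : (p.map Prod.fst).Nodup := by
      have := hnd.sublist ((p.sublist_append_left _).map Prod.fst)
      exact this
    have hxp : x.1 ∉ p.map Prod.fst := by
      rw [List.map_append] at hnd
      have hdisj := (List.nodup_append.mp hnd).2.2
      intro hmem
      exact hdisj _ hmem _ (List.mem_map_of_mem List.mem_cons_self) rfl
    simp only [List.foldl_cons]
    have hstep : pvMergeStep 2 (pvMerged dict1 p) x = pvMerged dict1 (p ++ [x]) := by
      by_cases hx1 : x.1 ∈ dict1.map Prod.fst
      · obtain ⟨wc0, h0, h0k⟩ := List.mem_map.mp hx1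
        have hget : (pvMerged dict1 p).get? x.1 = some (wc0.2, 1) := by
          rw [← h0k]
          exact pvMerged_get?_of_mem dict1 p h1 hp wc0 h0 (h0k ▸ hxp)
        simp only [pvMergeStep, hget]
        exact pvMerged_snoc_common dict1 p h1 x hxp wc0 h0 h0k
      · have hget : (pvMerged dict1 p).get? x.1 = none := pvMerged_get?_none dict1 p x.1 hx1 hxp
        simp only [pvMergeStep, hget]
        exact pvMerged_snoc_new dict1 p x hx1 hxp
    rw [hstep, ih (p ++ [x]) hnd']
    simp [List.append_assoc]

theorem pvClass_fold : ∀ (L : List (String × (Int × Int))) (a b c : List (String × Int)),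
    L.foldl pvClassStep (a, b, c)
    = (a ++ L.filterMap (fun e => if e.2.2 == 3 then some (e.1, e.2.1) else none),
       b ++ L.filterMap (fun e => if e.2.2 == 3 then none else if e.2.2 == 1 then some (e.1, e.2.1) else none),
       c ++ L.filterMap (fun e => if e.2.2 == 3 then none else if e.2.2 == 1 then none else some (e.1, e.2.1))) := by
  intro L
  induction L with
  | nil => intro a b c; simp
  | cons e L ih =>
    intro a b c
    simp only [List.foldl_cons, List.filterMap_cons, pvClassStep]
    by_cases h3 : e.2.2 = 3 <;> by_cases h1 : e.2.2 = 1 <;>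
      simp [h3, h1, ih, List.append_assoc]

theorem pvB_pass1 (dict1 : List (String × Int)) (h1 : (dict1.map Prod.fst).Nodup) :
    dict1.foldl (pvMergeStep 1) PySem.Dict.empty = pvMerged dict1 [] := by
  apply PySem.Dict.ext
  rw [pvMerge_fresh 1 dict1 PySem.Dict.empty h1 (fun x _ => by simp [PySem.Dict.contains_empty])]
  simp [pvMerged, PySem.Dict.empty]

theorem pvB_pass2 (dict1 dict2 : List (String × Int))
    (h1 : (dict1.map Prod.fst).Nodup) (h2 : (dict2.map Prod.fst).Nodup) :
    dict2.foldl (pvMergeStep 2) (pvMerged dict1 []) = pvMerged dict1 dict2 := by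
  have := pvMerge2 dict1 h1 dict2 [] (by simpa using h2)
  simpa using this

theorem pvB_classify (dict1 dict2 : List (String × Int)) :
    (pvMerged dict1 dict2).items.foldl pvClassStep ([], [], []) = pvCanon dict1 dict2 := by
  have hitems : (pvMerged dict1 dict2).items
      = dict1.map (fun wc => if (dict2.map Prod.fst).contains wc.1 then (wc.1, (wc.2 + (PySem.Dict.mk dict2).getD wc.1 0, (3:Int))) else (wc.1, (wc.2, 1)))
        ++ (dict2.filter (fun wc => ! (dict1.map Prod.fst).contains wc.1)).map (fun wc => (wc.1, (wc.2, (2:Int)))) := rfl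
  rw [hitems, pvClass_fold]
  unfold pvCanon
  simp only [List.nil_append, List.filterMap_append, List.filterMap_map]
  have e1 : ((fun e : String × (Int × Int) => if e.2.2 == 3 then some (e.1, e.2.1) else none) ∘ (fun wc : String × Int => if (dict2.map Prod.fst).contains wc.1 then (wc.1, (wc.2 + (PySem.Dict.mk dict2).getD wc.1 0, (3:Int))) else (wc.1, (wc.2, 1)))) = (fun wc : String × Int => if (dict2.map Prod.fst).contains wc.1 then some (wc.1, wc.2 + (PySem.Dict.mk dict2).getD wc.1 0) else none) := by
    funext wc
    dsimp only [Function.comp_apply]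
    by_cases h : (dict2.map Prod.fst).contains wc.1 = true
    · rw [if_pos h, if_pos h]; rfl
    · rw [if_neg h, if_neg h]; rfl
  have e2 : ((fun e : String × (Int × Int) => if e.2.2 == 3 then none else if e.2.2 == 1 then some (e.1, e.2.1) else none) ∘ (fun wc : String × Int => if (dict2.map Prod.fst).contains wc.1 then (wc.1, (wc.2 + (PySem.Dict.mk dict2).getD wc.1 0, (3:Int))) else (wc.1, (wc.2, 1)))) = (fun wc : String × Int => if (dict2.map Prod.fst).contains wc.1 then none else some wc) := by
    funext wc
    dsimp only [Function.comp_apply]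
    by_cases h : (dict2.map Prod.fst).contains wc.1 = true
    · rw [if_pos h, if_pos h]; rfl
    · rw [if_neg h, if_neg h]; rfl
  have e3 : ((fun e : String × (Int × Int) => if e.2.2 == 3 then some (e.1, e.2.1) else none) ∘ (fun wc : String × Int => (wc.1, (wc.2, (2:Int))))) = (fun _ : String × Int => none) := by
    funext wc; simp
  have e4 : ((fun e : String × (Int × Int) => if e.2.2 == 3 then none else if e.2.2 == 1 then some (e.1, e.2.1) else none) ∘ (fun wc : String × Int => (wc.1, (wc.2, (2:Int))))) = (fun _ : String × Int => none) := by
    funext wc; simp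
  have e5 : ((fun e : String × (Int × Int) => if e.2.2 == 3 then none else if e.2.2 == 1 then none else some (e.1, e.2.1)) ∘ (fun wc : String × Int => (wc.1, (wc.2, (2:Int))))) = some := by
    funext wc; simp
  have e6 : ((fun e : String × (Int × Int) => if e.2.2 == 3 then none else if e.2.2 == 1 then none else some (e.1, e.2.1)) ∘ (fun wc : String × Int => if (dict2.map Prod.fst).contains wc.1 then (wc.1, (wc.2 + (PySem.Dict.mk dict2).getD wc.1 0, (3:Int))) else (wc.1, (wc.2, 1)))) = (fun _ : String × Int => none) := by
    funext wc
    dsimp only [Function.comp_apply]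
    by_cases h : (dict2.map Prod.fst).contains wc.1 = true
    · rw [if_pos h]; rfl
    · rw [if_neg h]; rfl
  rw [e1, e2, e3, e4, e5, e6, pvFilterMap_filter]
  simp

-- ===== VERDICT (by name: the statement is the Claim_ definition above) =====
theorem CommonDistinctWords_spec : Claim_equal_CommonDistinctWords := by
  intro dict1 dict2 _ hpre
  obtain ⟨h1, h2⟩ := hpre
  unfold Spec_CommonDistinctWords
  have hA : CommonDistinctWords dict1 dict2 = pvCanon dict1 dict2 := by
    unfold CommonDistinctWords
    rw [pvA_pass1 dict1 dict2 h1 dict1 [] [] (fun _ h => h),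
        pvA_pass2 dict1 dict2 h2 dict2 [] (fun _ h => h)]
    simp [pvCanon]
  have hB : CommonDistinctWords_alt dict1 dict2 = pvCanon dict1 dict2 := by
    unfold CommonDistinctWords_alt
    simp only [List.foldl_cons, List.foldl_nil]
    rw [pvB_pass1 dict1 h1, pvB_pass2 dict1 dict2 h1 h2, pvB_classify dict1 dict2]
  rw [hA, hB]
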